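-- pv_equiv track=rewrite | github.com/huytq000605/CF-CP | Codeforces Round #765 (Div. 2)/A.py | solve
-- ===== SOURCE A (Python) =====
-- def solve(nums, n, l):
--     result = 0
--     for digit in range(l):
--         set_bit = 0
--         for num in nums:
--             if (num >> digit) & 1:
--                 set_bit += 1
--         if set_bit > (n- set_bit):
--             result |= (1<<digit)
--     return result
-- ===== SOURCE B (Python) =====
-- def solve(nums, n, l):
--     # divide & conquer on the bit range: low half directly, high half on the
--     # numbers shifted right by h, recombined with a shift
--     if l <= 0:
--         return 0
--     if l == 1:
--         ones = sum(num & 1 for num in nums)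
--         return 1 if ones > n - ones else 0
--     h = l // 2
--     low = solve(nums, n, h)
--     high = solve([num >> h for num in nums], n, l - h)
--     return low + (high << h)
-- ===== Notes on version B (the rewrite author's own statement) =====
-- stated objective: alternative
-- what changed: B replaces A's iterative per-bit rescan with a divide-and-conquer recursion on the bit range: it splits [0,l) at l//2, solves the low half directly and the high half on the numbers shifted right by h, combining the two results with a shift.
import Mathlib
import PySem

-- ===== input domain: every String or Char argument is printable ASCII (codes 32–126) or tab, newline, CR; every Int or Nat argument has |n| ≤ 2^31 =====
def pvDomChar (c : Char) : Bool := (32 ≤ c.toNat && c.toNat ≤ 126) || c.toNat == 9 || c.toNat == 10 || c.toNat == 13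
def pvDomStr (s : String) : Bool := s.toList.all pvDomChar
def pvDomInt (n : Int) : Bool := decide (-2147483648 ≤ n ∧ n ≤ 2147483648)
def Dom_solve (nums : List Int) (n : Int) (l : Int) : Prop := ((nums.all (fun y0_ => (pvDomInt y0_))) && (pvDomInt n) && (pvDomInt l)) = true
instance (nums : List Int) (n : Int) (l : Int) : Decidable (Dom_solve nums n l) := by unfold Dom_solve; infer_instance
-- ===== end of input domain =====

-- B solves the majority-bit task by divide and conquer on the bit range instead of A's per-bit rescan loop (objective: alternative).

-- ===== PORT A =====
-- inner loop of A: set_bit = 0; for num in nums: if (num >> digit) & 1: set_bit += 1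
def solveSetBit (nums : List Int) (digit : Int) : Int :=
  nums.foldl (fun (set_bit : Int) (num : Int) =>
    if PySem.Int.band (num >>> digit.toNat) 1 ≠ 0 then set_bit + 1 else set_bit) 0

-- for each digit in range(l), rescan all of nums counting set bits, then set the bit by majority
def solve (nums : List Int) (n : Int) (l : Int) : Int :=
  (PySem.List.pyRange 0 l 1).foldl (fun (result : Int) (digit : Int) =>
    let set_bit := solveSetBit nums digit
    if set_bit > n - set_bit then PySem.Int.bor result ((1 : Int) <<< digit.toNat) else result) 0

-- ===== PORT B =====
-- termination helper for the port's recursion (cited by name in decreasing_by)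
theorem pv_half_lt (l : Int) (h2 : ¬ l ≤ 0) (h1 : ¬ l = 1) :
    (PySem.Int.floordiv l 2).toNat < l.toNat ∧ (l - PySem.Int.floordiv l 2).toNat < l.toNat := by
  rw [PySem.Int.floordiv_eq_ediv_of_pos (by omega)]
  omega

-- divide & conquer on the bit range [0, l): base cases l <= 0 and l == 1, otherwise
-- split at h = l // 2, recurse on the low half and on the numbers shifted right by h,
-- recombine as low + (high << h)  (num >> h with h >= 1 ported exactly as >>> h.toNat)
def solve_alt (nums : List Int) (n : Int) (l : Int) : Int :=
  if _h0 : l ≤ 0 then 0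
  else if _h1 : l = 1 then
    let ones := nums.foldl (fun (s : Int) (num : Int) => s + PySem.Int.band num 1) 0
    if ones > n - ones then 1 else 0
  else
    let h := PySem.Int.floordiv l 2
    let low := solve_alt nums n h
    let high := solve_alt (nums.map (fun (num : Int) => num >>> h.toNat)) n (l - h)
    low + (high <<< h.toNat)
termination_by l.toNat
decreasing_by
  · exact (pv_half_lt l _h0 _h1).1
  · exact (pv_half_lt l _h0 _h1).2

-- ===== PRECONDITION & SPEC =====
def Spec_solve (nums : List Int) (n : Int) (l : Int) (out : Int) : Prop := out = solve_alt nums n l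
instance (nums : List Int) (n : Int) (l : Int) (out : Int) : Decidable (Spec_solve nums n l out) := by unfold Spec_solve; infer_instance

-- ===== CLAIM (what is proved, stated in full; the proofs are below) =====
def Claim_equal_solve : Prop := ∀ (nums : List Int) (n : Int) (l : Int), Dom_solve nums n l → Spec_solve nums n l (solve nums n l)

-- ===== LEMMAS AND PROOFS =====

-- total count of set bits at position d over nums
def pvCnt (nums : List Int) (d : Nat) : Int :=
  nums.foldl (fun (s : Int) (num : Int) => s + PySem.Int.band (num >>> d) 1) 0

-- canonical value: sum over the bit positions of the majority bits
def pvSum (nums : List Int) (n : Int) (L : Nat) : Int :=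
  ∑ d ∈ Finset.range L, if pvCnt nums d + pvCnt nums d > n then ((1 : Int) <<< d) else 0

theorem pv_bit01 (x : Int) : PySem.Int.band x 1 = 0 ∨ PySem.Int.band x 1 = 1 := by
  rw [PySem.Int.band_one]
  have h2 : PySem.Int.mod x 2 = x % 2 := by
    unfold PySem.Int.mod
    rcases Int.emod_two_eq_zero_or_one x with h | h <;>
      simp [h, Int.fmod_eq_emod]
  rw [h2]
  exact Int.emod_two_eq_zero_or_one x

theorem pv_setbit_eq_cnt (nums : List Int) (d : Nat) : ∀ (a : Int),
    nums.foldl (fun (s : Int) (num : Int) =>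
        if PySem.Int.band (num >>> d) 1 ≠ 0 then s + 1 else s) a
      = nums.foldl (fun (s : Int) (num : Int) => s + PySem.Int.band (num >>> d) 1) a := by
  induction nums with
  | nil => intro a; rfl
  | cons x xs ih =>
    intro a
    simp only [List.foldl_cons]
    rcases pv_bit01 (x >>> d) with h | h <;> simp only [h] <;> rw [ih] <;> norm_num

theorem pv_or_two_pow (r k : Nat) (h : r < 2 ^ k) : r ||| 2 ^ k = 2 ^ k + r := by
  apply Nat.eq_of_testBit_eq
  intro i
  rw [Nat.testBit_or]
  rcases lt_trichotomy i k with hik | rfl | hik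
  · rw [Nat.testBit_two_pow_add_gt hik, Nat.testBit_two_pow_of_ne (by omega), Bool.or_false]
  · rw [Nat.testBit_two_pow_add_eq, Nat.testBit_lt_two_pow h, Nat.testBit_two_pow_self,
      Bool.false_or, Bool.not_false]
  · have hpow : 2 ^ k < 2 ^ i := Nat.pow_lt_pow_right (by norm_num) hik
    have hpow2 : 2 ^ k + 2 ^ k ≤ 2 ^ i := by
      calc 2 ^ k + 2 ^ k = 2 ^ (k + 1) := by ring
        _ ≤ 2 ^ i := Nat.pow_le_pow_right (by norm_num) (by omega)
    have e1 : r.testBit i = false := Nat.testBit_lt_two_pow (by omega)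
    have e2 : ((2 : Nat) ^ k).testBit i = false := Nat.testBit_two_pow_of_ne (by omega)
    have e3 : ((2 : Nat) ^ k + r).testBit i = false := Nat.testBit_lt_two_pow (by omega)
    rw [e1, e2, e3, Bool.or_false]

theorem pv_one_shiftLeft (k : Nat) : (1 : Int) <<< k = ((2 ^ k : Nat) : Int) := by
  rw [Int.shiftLeft_eq]
  push_cast
  ring

theorem pv_bor_pow (r : Int) (k : Nat) (h0 : 0 ≤ r) (h : r < (2 ^ k : Nat)) :
    PySem.Int.bor r ((1 : Int) <<< k) = r + (1 : Int) <<< k := by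
  rw [pv_one_shiftLeft]
  rw [PySem.Int.bor_of_nonneg h0 (by positivity)]
  rw [Int.toNat_natCast]
  rw [pv_or_two_pow r.toNat k (by omega)]
  omega

theorem pv_orfold (P : Nat → Prop) [DecidablePred P] (L : Nat) :
    0 ≤ (List.range L).foldl (fun (r : Int) d => if P d then r + ((1 : Int) <<< d) else r) 0 ∧
    (List.range L).foldl (fun (r : Int) d => if P d then r + ((1 : Int) <<< d) else r) 0 < ((2 ^ L : Nat) : Int) ∧
    (List.range L).foldl (fun (r : Int) d => if P d then PySem.Int.bor r ((1 : Int) <<< d) else r) 0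
      = (List.range L).foldl (fun (r : Int) d => if P d then r + ((1 : Int) <<< d) else r) 0 := by
  induction L with
  | zero =>
    refine ⟨le_refl 0, ?_, ?_⟩
    · norm_num
    · rfl
  | succ L ih =>
    obtain ⟨h0, hlt, heq⟩ := ih
    rw [List.range_succ]
    simp only [List.foldl_append]
    rw [heq]
    set b := (List.range L).foldl (fun (r : Int) d => if P d then r + ((1 : Int) <<< d) else r) 0 with hb
    simp only [List.foldl_cons, List.foldl_nil]
    have hpow : ((2 ^ (L + 1) : Nat) : Int) = ((2 ^ L : Nat) : Int) + ((2 ^ L : Nat) : Int) := by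
      push_cast; ring
    by_cases hP : P L
    · simp only [if_pos hP]
      rw [pv_one_shiftLeft, hpow]
      have hbor := pv_bor_pow b L h0 hlt
      rw [pv_one_shiftLeft] at hbor
      refine ⟨by positivity, by omega, hbor⟩
    · simp only [if_neg hP]
      exact ⟨h0, by omega, trivial⟩

theorem pv_addfold_eq_sum (P : Nat → Prop) [DecidablePred P] (L : Nat) :
    (List.range L).foldl (fun (r : Int) d => if P d then r + ((1 : Int) <<< d) else r) 0
      = ∑ d ∈ Finset.range L, if P d then ((1 : Int) <<< d) else 0 := by
  induction L with
  | zero => rfl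
  | succ L ih =>
    rw [List.range_succ, List.foldl_append, ih, Finset.sum_range_succ]
    simp only [List.foldl_cons, List.foldl_nil]
    split_ifs <;> ring

-- Port A computes the canonical sum
theorem pvA_eq (nums : List Int) (n : Int) (l : Int) :
    solve nums n l = pvSum nums n l.toNat := by
  unfold solve
  rw [PySem.List.pyRange_one]
  have hl0 : (l - 0).toNat = l.toNat := by omega
  rw [hl0]
  simp only [List.foldl_map, zero_add, Int.toNat_natCast]
  have hA : (List.range l.toNat).foldl (fun (result : Int) (d : Nat) =>
        let set_bit := solveSetBit nums (d : Int)
        if set_bit > n - set_bit then PySem.Int.bor result ((1 : Int) <<< d) else result) 0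
      = (List.range l.toNat).foldl (fun (result : Int) (d : Nat) =>
        if pvCnt nums d + pvCnt nums d > n then PySem.Int.bor result ((1 : Int) <<< d) else result) 0 := by
    apply PySem.List.foldl_congr_mem
    intro r d _
    rw [show solveSetBit nums (d : Int) = pvCnt nums d by
      unfold solveSetBit pvCnt; rw [Int.toNat_natCast]; exact pv_setbit_eq_cnt nums d 0]
    have hiff : (pvCnt nums d > n - pvCnt nums d) = (pvCnt nums d + pvCnt nums d > n) := by
      apply propext; constructor <;> intro <;> omega
    simp only [hiff]
  rw [hA]
  rw [(pv_orfold (fun d => pvCnt nums d + pvCnt nums d > n) l.toNat).2.2]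
  exact pv_addfold_eq_sum (fun d => pvCnt nums d + pvCnt nums d > n) l.toNat

-- counting bit d of the numbers shifted right by H counts bit H+d of the originals
theorem pv_cnt_shift (nums : List Int) (H d : Nat) :
    pvCnt (nums.map (fun (x : Int) => x >>> H)) d = pvCnt nums (H + d) := by
  unfold pvCnt
  rw [List.foldl_map]
  congr 1
  funext s x
  rw [Int.shiftRight_add]

-- splitting the canonical sum at bit H
theorem pv_sum_split (nums : List Int) (n : Int) (H K : Nat) :
    pvSum nums n (H + K)
      = pvSum nums n H + (pvSum (nums.map (fun (x : Int) => x >>> H)) n K) * 2 ^ H := by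
  unfold pvSum
  rw [Finset.sum_range_add, Finset.sum_mul]
  congr 1
  apply Finset.sum_congr rfl
  intro d _
  rw [pv_cnt_shift nums H d]
  split_ifs
  · rw [Int.shiftLeft_eq, Int.shiftLeft_eq, pow_add]; ring
  · ring

-- Port B computes the canonical sum
theorem pvB_eq (n : Int) : ∀ (L : Nat) (nums : List Int) (l : Int), l.toNat = L →
    solve_alt nums n l = pvSum nums n L := by
  intro L
  induction L using Nat.strong_induction_on with
  | _ L ih =>
    intro nums l hL
    rw [solve_alt]
    split_ifs with h0 h1
    · have : L = 0 := by omega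
      simp [this, pvSum]
    · have hL1 : L = 1 := by omega
      have hones : nums.foldl (fun (s : Int) (num : Int) => s + PySem.Int.band num 1) 0
          = pvCnt nums 0 := by
        unfold pvCnt
        simp [Int.shiftRight_zero]
      rw [hones, hL1]
      unfold pvSum
      rw [Finset.sum_range_one]
      have hiff : (pvCnt nums 0 > n - pvCnt nums 0) = (pvCnt nums 0 + pvCnt nums 0 > n) := by
        apply propext; constructor <;> intro <;> omega
      simp only [hiff]
      split_ifs <;> rfl
    · simp only []
      have hdiv : PySem.Int.floordiv l 2 = l / 2 := PySem.Int.floordiv_eq_ediv_of_pos (by omega)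
      set h := PySem.Int.floordiv l 2 with hh
      have hb : 1 ≤ h ∧ h < l := by rw [hdiv]; omega
      have hHK : h.toNat + (l - h).toNat = L := by omega
      rw [ih h.toNat (by omega) nums h rfl,
          ih (l - h).toNat (by omega) (nums.map (fun (num : Int) => num >>> h.toNat)) (l - h) rfl,
          ← hHK, pv_sum_split, Int.shiftLeft_eq]

-- ===== VERDICT (by name: the statement is the Claim_ definition above) =====
theorem solve_spec : Claim_equal_solve := by
  intro nums n l _
  unfold Spec_solve
  rw [pvA_eq, pvB_eq n l.toNat nums l rfl]
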